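-- pv_equiv track=rewrite | github.com/HawChang/text_utils | utils/static_predict.py | _gen_batch_data
-- ===== SOURCE A (Python) =====
-- def _gen_batch_data(data_iter, batch_size=32):
--     """数据分批
--     """
--     batch_data = list()
--     for data in data_iter:
--         if len(batch_data) == batch_size:
--             # 当前已组成一个batch
--             yield batch_data
--             batch_data = list()
--         batch_data.append(data)
--
--     if len(batch_data) > 0:
--         yield batch_data
-- ===== SOURCE B (Python) =====
-- def _gen_batch_data(data_iter, batch_size=32):
--     """数据分批"""
--     it = iter(data_iter)
--     while True:
--         batch = [x for _, x in zip(range(batch_size), it)]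
--         if not batch:
--             return
--         yield batch
-- ===== Notes on version B (the rewrite author's own statement) =====
-- stated objective: idiomatic
-- what changed: B pulls the iterator in fixed-size chunks (zip(range(batch_size), it)) and stops when a chunk comes back empty, instead of accumulating a list element by element and yielding it on a length-equality check.
-- outside the precondition, e.g. on _gen_batch_data([1, 2], 0): A returns [[], [1, 2]], B returns []; on _gen_batch_data([1, 2], -1): A returns [[1, 2]], B returns []
import Mathlib
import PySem

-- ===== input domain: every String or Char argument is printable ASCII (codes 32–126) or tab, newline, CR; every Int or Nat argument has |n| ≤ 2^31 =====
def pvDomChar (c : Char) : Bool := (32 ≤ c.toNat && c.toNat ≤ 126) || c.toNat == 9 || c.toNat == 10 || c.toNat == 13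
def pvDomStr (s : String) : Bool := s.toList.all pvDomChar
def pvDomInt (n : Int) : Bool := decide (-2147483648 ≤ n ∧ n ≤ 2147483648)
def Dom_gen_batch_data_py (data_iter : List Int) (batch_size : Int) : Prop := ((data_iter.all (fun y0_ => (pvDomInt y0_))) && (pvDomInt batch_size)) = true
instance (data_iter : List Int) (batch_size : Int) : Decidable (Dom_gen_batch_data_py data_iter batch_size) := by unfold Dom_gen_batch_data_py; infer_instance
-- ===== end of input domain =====

-- B chunks the input pull-based in fixed-size slices instead of accumulating a list and
-- yielding on a length-equality check (objective: idiomatic; same O(n) cost).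


-- ===== PORT A =====
-- loop over data_iter carrying the current partial batch `acc`; at the end yield the
-- leftover batch if non-empty
def genBatchA (bs : Int) (data : List Int) (acc : List Int) : List (List Int) :=
  match data with
  | [] => if acc.length > 0 then [acc] else []
  | d :: ds =>
    if (acc.length : Int) = bs then acc :: genBatchA bs ds [d]
    else genBatchA bs ds (acc ++ [d])

def gen_batch_data_py (data_iter : List Int) (batch_size : Int) : List (List Int) :=
  genBatchA batch_size data_iter []

-- ===== PORT B =====
-- pull one slice of b elements off the front of the remaining input; an empty slice
-- (input exhausted, or b = 0) ends the loop
def genBatchB (b : Nat) (l : List Int) : List (List Int) :=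
  match l with
  | [] => []
  | x :: xs =>
    if b = 0 then []
    else (x :: xs.take (b - 1)) :: genBatchB b (xs.drop (b - 1))
termination_by l.length
decreasing_by
  simp only [List.length_cons, List.length_drop]
  omega

def gen_batch_data_py_alt (data_iter : List Int) (batch_size : Int) : List (List Int) :=
  genBatchB batch_size.toNat data_iter

-- ===== PRECONDITION & SPEC =====
-- Pre_ excludes non-positive batch_size, on which A's values (an empty leading batch for
-- batch_size = 0, a single unbounded batch for negative batch_size) are accidents of its
-- length-equality check that no caller would specify; B there yields no batches at all.
def Pre_gen_batch_data_py (data_iter : List Int) (batch_size : Int) : Prop :=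
  1 ≤ batch_size
instance (data_iter : List Int) (batch_size : Int) : Decidable (Pre_gen_batch_data_py data_iter batch_size) := by unfold Pre_gen_batch_data_py; infer_instance

def pvWitness_gen_batch_data_py : List Int × Int := ([1, 2, 3, 4, 5], 2)

def Spec_gen_batch_data_py (data_iter : List Int) (batch_size : Int) (out : List (List Int)) : Prop := out = gen_batch_data_py_alt data_iter batch_size
instance (data_iter : List Int) (batch_size : Int) (out : List (List Int)) : Decidable (Spec_gen_batch_data_py data_iter batch_size out) := by unfold Spec_gen_batch_data_py; infer_instance

-- ===== CLAIM (what is proved, stated in full; the proofs are below) =====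
def Claim_equal_gen_batch_data_py : Prop := ∀ (data_iter : List Int) (batch_size : Int), Dom_gen_batch_data_py data_iter batch_size → Pre_gen_batch_data_py data_iter batch_size → Spec_gen_batch_data_py data_iter batch_size (gen_batch_data_py data_iter batch_size)

-- ===== LEMMAS AND PROOFS =====

-- a full chunk peels off the front of genBatchB's input
theorem genBatchB_chunk (b : Nat) (l r : List Int) (h1 : 1 ≤ b) (h2 : l.length = b) :
    genBatchB b (l ++ r) = l :: genBatchB b r := by
  match l with
  | [] => simp at h2; omega
  | y :: ys =>
    simp only [List.cons_append, genBatchB]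
    have hb : ¬ b = 0 := by omega
    simp only [if_neg hb]
    have hys : ys.length = b - 1 := by simp at h2; omega
    rw [List.take_append_of_le_length (by omega), List.take_of_length_le (by omega),
        List.drop_append_of_le_length (by omega), List.drop_of_length_le (by omega)]
    simp

-- main invariant: A's in-flight partial batch `acc` (shorter than the batch size)
-- produces the same batches as B chunking `acc ++ data`
theorem genBatchA_eq (bs : Int) (h : 1 ≤ bs) (data : List Int) :
    ∀ acc : List Int, acc.length ≤ bs.toNat →
      genBatchA bs data acc = genBatchB bs.toNat (acc ++ data) := by
  induction data with
  | nil =>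
    intro acc hacc
    simp only [genBatchA, List.append_nil]
    match acc with
    | [] => simp [genBatchB]
    | a :: as =>
      have hb : ¬ bs.toNat = 0 := by omega
      simp only [List.length_cons, genBatchB, if_neg hb]
      rw [List.take_of_length_le (by simp at hacc ⊢; omega),
          List.drop_of_length_le (by simp at hacc ⊢; omega)]
      simp [genBatchB]
  | cons d ds ih =>
    intro acc hacc
    simp only [genBatchA]
    by_cases hfull : (acc.length : Int) = bs
    · simp only [if_pos hfull]
      rw [ih [d] (by simp; omega)]
      rw [genBatchB_chunk bs.toNat acc (d :: ds) (by omega) (by omega)]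
      simp
    · simp only [if_neg hfull]
      rw [ih (acc ++ [d]) (by simp; omega)]
      simp

-- ===== VERDICT (by name: the statement is the Claim_ definition above) =====
theorem gen_batch_data_py_spec : Claim_equal_gen_batch_data_py := by
  intro data_iter batch_size _ hpre
  unfold Spec_gen_batch_data_py gen_batch_data_py gen_batch_data_py_alt
  simpa using genBatchA_eq batch_size hpre data_iter [] (by simp)
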